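-- pv_equiv track=rewrite | github.com/romeorizzi/portafoglioVoti_public | Algoritmi/2022-06-29/all-CMS-submissions-2022-06-29/20220629T113406.VR476706.A_seq.py | findAseq1
-- ===== SOURCE A (Python) =====
-- def findAseq1(lista):
--     current_max = 0
--     count_max = 0
--     for i in range(0, len(lista)):
--         current = 0
--         if i == 0:
--             current = findAseqRec(lista[1::], lista[i]+1, 1)
--         elif i == len(lista) - 1:
--             current = findAseqRec(lista[0:len(lista)-1], lista[i]-1, 0)
--         #elif lista[i] > lista[i-1] and lista[i] > lista[i+1]:
--         else:
--             current = findAseqRec(lista[0:i], lista[i]-1, 0) + findAseqRec(lista[i+1::], lista[i]+1, 1)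
--         if current > current_max:
--             current_max = current
--             count_max = 1
--         elif (current == current_max):
--             count_max += 1
--     return current_max, count_max + 1
--
-- def findAseqRec(lista, piv, mode):
--     if mode == 0:
--         if len(lista) <= 0:
--             return 0
--         if lista[len(lista)-1] < piv:
--             return 1 + findAseqRec(lista[0:len(lista)-1], lista[len(lista)-1], mode)
--         else:
--             return 0 + findAseqRec(lista[0:len(lista)-1], lista[len(lista)-1], mode)
--     elif mode == 1:
--         if len(lista) <= 0:
--             return 0
--         if lista[0] < piv:
--             return 1 + findAseqRec(lista[1::], lista[0], mode)
--         else: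
--             return 0 + findAseqRec(lista[1::], lista[0], mode)
-- ===== SOURCE B (Python) =====
-- # One-pass reformulation: precompute suffix descent counts, maintain prefix ascent
-- # count on the fly; each pivot's value is pref + boundaries + suff in O(1) (O(n) total).
-- def findAseq1(lista):
--     n = len(lista)
--     # suff[k] = number of adjacent strict descents within lista[k:], filled right to left
--     suff = [0] * (n + 1)
--     for k in range(n - 2, -1, -1):
--         suff[k] = suff[k + 1] + (1 if lista[k + 1] < lista[k] else 0)
--     best, cnt, pref = 0, 0, 0
--     for i in range(n):
--         cur = pref + suff[i + 1]
--         if i > 0 and lista[i - 1] < lista[i] - 1: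
--             cur += 1
--         if i < n - 1 and lista[i + 1] < lista[i] + 1:
--             cur += 1
--         if cur > best:
--             best, cnt = cur, 1
--         elif cur == best:
--             cnt += 1
--         if i > 0 and lista[i - 1] < lista[i]:
--             pref += 1
--     return best, cnt + 1
-- ===== Notes on version B (the rewrite author's own statement) =====
-- stated objective: faster
-- what changed: A rescans both sides of every pivot with a recursive slicing helper; B precomputes a suffix table of adjacent strict descents and maintains a running prefix count of adjacent strict ascents, so each pivot's value is computed in O(1) from the table, two boundary comparisons and the running count.
import Mathlib
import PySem

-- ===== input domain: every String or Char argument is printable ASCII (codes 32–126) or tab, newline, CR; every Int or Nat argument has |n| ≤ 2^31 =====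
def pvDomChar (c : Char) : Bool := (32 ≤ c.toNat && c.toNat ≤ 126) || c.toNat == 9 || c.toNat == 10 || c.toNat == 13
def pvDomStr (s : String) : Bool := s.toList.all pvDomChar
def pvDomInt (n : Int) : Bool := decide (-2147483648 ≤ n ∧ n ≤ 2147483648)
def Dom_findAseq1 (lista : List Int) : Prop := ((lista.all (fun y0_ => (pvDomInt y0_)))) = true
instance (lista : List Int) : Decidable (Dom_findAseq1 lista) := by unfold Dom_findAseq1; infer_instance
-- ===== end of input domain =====

-- B replaces A's per-pivot recursive rescans by a precomputed suffix-descent table and a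
-- running prefix-ascent counter (O(n) instead of rescanning both sides for every pivot).

-- ===== PORT A =====
-- helper findAseqRec: mode 0 scans from the back (lista[len-1], lista[0:len-1]),
-- mode 1 scans from the front (lista[0], lista[1::]); exact transliteration.
def findAseqRec (lista : List Int) (piv : Int) (mode : Int) : Int :=
  if mode == 0 then
    if lista.length ≤ 0 then 0
    else
      let x := lista.getLast?.getD 0      -- lista[len(lista)-1], list nonempty so in range
      (if x < piv then 1 else 0) + findAseqRec lista.dropLast x mode   -- lista[0:len(lista)-1]
  else if mode == 1 then
    if lista.length ≤ 0 then 0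
    else
      let x := lista.headD 0              -- lista[0]
      (if x < piv then 1 else 0) + findAseqRec lista.tail x mode      -- lista[1::]
  else 0  -- Python returns None here; unreachable at every call site (mode is 0 or 1)
termination_by lista.length
decreasing_by
  · simp only [List.length_dropLast]; omega
  · simp only [List.length_tail]; omega

def findAseq1 (lista : List Int) : Int × Int :=
  let n := lista.length
  let r := (List.range n).foldl (fun (s : Int × Int) i =>
    let current : Int :=
      if i = 0 then
        findAseqRec (lista.drop 1) (lista.getD i 0 + 1) 1            -- lista[1::], lista[i]+1
      else if i = n - 1 then
        findAseqRec (lista.take (n - 1)) (lista.getD i 0 - 1) 0      -- lista[0:len-1], lista[i]-1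
      else
        findAseqRec (lista.take i) (lista.getD i 0 - 1) 0 +          -- lista[0:i]
        findAseqRec (lista.drop (i + 1)) (lista.getD i 0 + 1) 1      -- lista[i+1::]
    if current > s.1 then (current, 1)
    else if current = s.1 then (s.1, s.2 + 1)
    else s) ((0 : Int), (0 : Int))
  (r.1, r.2 + 1)

-- ===== PORT B =====
-- Source B fills suff[] right to left (suff[k] = suff[k+1] + [lista[k+1] < lista[k]]);
-- ported as a right-to-left structural recursion producing the same values in the same order.
def suffCounts : List Int → List Int
  | [] => [0]
  | [_] => [0, 0]
  | a :: b :: t =>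
      let rest := suffCounts (b :: t)
      (rest.headD 0 + if b < a then 1 else 0) :: rest

def findAseq1_alt (lista : List Int) : Int × Int :=
  let n := lista.length
  let suff := suffCounts lista
  let r := (List.range n).foldl (fun (s : Int × Int × Int) i =>
    let cur0 := s.2.2 + suff.getD (i + 1) 0
    let cur1 := if 0 < i ∧ lista.getD (i - 1) 0 < lista.getD i 0 - 1 then cur0 + 1 else cur0
    let cur := if i < n - 1 ∧ lista.getD (i + 1) 0 < lista.getD i 0 + 1 then cur1 + 1 else cur1
    let bc : Int × Int :=
      if cur > s.1 then (cur, 1)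
      else if cur = s.1 then (s.1, s.2.1 + 1)
      else (s.1, s.2.1)
    let pref := if 0 < i ∧ lista.getD (i - 1) 0 < lista.getD i 0 then s.2.2 + 1 else s.2.2
    (bc.1, bc.2, pref)) ((0 : Int), (0 : Int), (0 : Int))
  (r.1, r.2.1 + 1)

-- ===== PRECONDITION & SPEC =====
def Spec_findAseq1 (lista : List Int) (out : Int × Int) : Prop := out = findAseq1_alt lista
instance (lista : List Int) (out : Int × Int) : Decidable (Spec_findAseq1 lista out) := by unfold Spec_findAseq1; infer_instance

-- ===== CLAIM (what is proved, stated in full; the proofs are below) =====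
def Claim_equal_findAseq1 : Prop := ∀ (lista : List Int), Dom_findAseq1 lista → Spec_findAseq1 lista (findAseq1 lista)

-- ===== LEMMAS AND PROOFS =====
-- proof-side spec helpers
def ascCount : List Int → Int
  | a :: b :: t => (if a < b then 1 else 0) + ascCount (b :: t)
  | _ => 0
def descCount : List Int → Int
  | a :: b :: t => (if b < a then 1 else 0) + descCount (b :: t)
  | _ => 0
lemma headD_eq_getD (l : List Int) (d : Int) : l.headD d = l.getD 0 d := by cases l <;> rfl
lemma asc_snoc (l : List Int) (c : Int) :
    ascCount (l ++ [c]) =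
      ascCount l + (match l.getLast? with | some a => if a < c then 1 else 0 | none => 0) := by
  induction l with
  | nil => simp [ascCount]
  | cons x t ih =>
    cases t with
    | nil => simp [ascCount]
    | cons y ys =>
      simp only [List.cons_append, ascCount] at ih ⊢
      rw [ih, List.getLast?_cons_cons]
      ring
lemma desc_cons (c : Int) (m : List Int) :
    descCount (c :: m) =
      (match m.head? with | some x => if x < c then 1 else 0 | none => 0) + descCount m := by
  cases m <;> simp [descCount]
lemma rec1_eq (l : List Int) (p : Int) : findAseqRec l p 1 = descCount (p :: l) := by
  induction l generalizing p with
  | nil => rw [findAseqRec]; simp [descCount]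
  | cons x t ih =>
    rw [findAseqRec]
    simp only [show ((1:Int) == 0) = false by decide, show ((1:Int) == 1) = true by decide,
      Bool.false_eq_true, if_false, if_true, List.length_cons, List.headD_cons, List.tail_cons]
    rw [ih x]
    simp [descCount]
lemma rec0_eq (l : List Int) (p : Int) : findAseqRec l p 0 = ascCount (l ++ [p]) := by
  induction l using List.reverseRecOn generalizing p with
  | nil => rw [findAseqRec]; simp [ascCount]
  | append_singleton l x ih =>
    rw [findAseqRec]
    simp only [show ((0:Int) == 0) = true by decide, if_true, List.length_append,
      List.length_singleton, List.getLast?_concat, List.dropLast_concat, Option.getD_some]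
    rw [ih x]
    have h2 : ¬ (l.length + 1 ≤ 0) := by omega
    rw [if_neg h2]
    have hs := asc_snoc (l ++ [x]) p
    rw [List.getLast?_concat] at hs
    rw [hs]
    ring
lemma suff_getD (l : List Int) (k : Nat) (hk : k ≤ l.length) :
    (suffCounts l).getD k 0 = descCount (l.drop k) := by
  induction l generalizing k with
  | nil =>
    have : k = 0 := by simpa using hk
    subst this
    simp [suffCounts, descCount]
  | cons a t ih =>
    cases t with
    | nil =>
      simp only [List.length_cons, List.length_nil] at hk
      match k, hk with
      | 0, _ => simp [suffCounts, descCount]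
      | 1, _ => simp [suffCounts, descCount]
    | cons b t2 =>
      cases k with
      | zero =>
        simp only [suffCounts, List.drop_zero, List.getD_cons_zero]
        rw [headD_eq_getD, ih 0 (by simp)]
        simp only [List.drop_zero, descCount]
        ring
      | succ k' =>
        simp only [suffCounts, List.getD_cons_succ, List.drop_succ_cons]
        exact ih k' (by simpa using hk)
lemma getLast?_take (l : List Int) (j : Nat) (h0 : 0 < j) (hj : j ≤ l.length) :
    (l.take j).getLast? = some (l.getD (j - 1) 0) := by
  rw [List.getLast?_eq_getElem?]
  have hlen : (l.take j).length = j := by simp [Nat.min_eq_left hj]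
  rw [hlen, List.getElem?_take_of_lt (by omega), List.getD_eq_getElem?_getD]
  have : j - 1 < l.length := by omega
  simp [List.getElem?_eq_getElem this]
lemma asc_take_succ (l : List Int) (j : Nat) (hj : j < l.length) :
    ascCount (l.take (j + 1)) =
      ascCount (l.take j) + (if 0 < j ∧ l.getD (j - 1) 0 < l.getD j 0 then 1 else 0) := by
  have ht : l.take (j + 1) = l.take j ++ [l[j]] := by
    rw [List.take_add_one, List.getElem?_eq_getElem hj]; rfl
  rw [ht, asc_snoc]
  rcases Nat.eq_zero_or_pos j with h | h
  · subst h; simp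
  · rw [getLast?_take l j h (by omega)]
    have : l.getD j 0 = l[j] := by simp [List.getD_eq_getElem?_getD, List.getElem?_eq_getElem hj]
    simp only [h, true_and, List.getD_eq_getElem?_getD, List.getElem?_eq_getElem hj,
      Option.getD_some]
-- named copies of the two loop bodies (definitionally equal to the lambdas in the ports)
def stepA (lista : List Int) (s : Int × Int) (i : Nat) : Int × Int :=
  let current : Int :=
    if i = 0 then
      findAseqRec (lista.drop 1) (lista.getD i 0 + 1) 1
    else if i = lista.length - 1 then
      findAseqRec (lista.take (lista.length - 1)) (lista.getD i 0 - 1) 0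
    else
      findAseqRec (lista.take i) (lista.getD i 0 - 1) 0 +
      findAseqRec (lista.drop (i + 1)) (lista.getD i 0 + 1) 1
  if current > s.1 then (current, 1)
  else if current = s.1 then (s.1, s.2 + 1)
  else s

def stepB (lista : List Int) (s : Int × Int × Int) (i : Nat) : Int × Int × Int :=
  let cur0 := s.2.2 + (suffCounts lista).getD (i + 1) 0
  let cur1 := if 0 < i ∧ lista.getD (i - 1) 0 < lista.getD i 0 - 1 then cur0 + 1 else cur0
  let cur := if i < lista.length - 1 ∧ lista.getD (i + 1) 0 < lista.getD i 0 + 1 then cur1 + 1 else cur1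
  let bc : Int × Int :=
    if cur > s.1 then (cur, 1)
    else if cur = s.1 then (s.1, s.2.1 + 1)
    else (s.1, s.2.1)
  let pref := if 0 < i ∧ lista.getD (i - 1) 0 < lista.getD i 0 then s.2.2 + 1 else s.2.2
  (bc.1, bc.2, pref)

lemma findAseq1_eq_fold (lista : List Int) :
    findAseq1 lista =
      (((List.range lista.length).foldl (stepA lista) (0, 0)).1,
       ((List.range lista.length).foldl (stepA lista) (0, 0)).2 + 1) := rfl

lemma findAseq1_alt_eq_fold (lista : List Int) :
    findAseq1_alt lista =
      (((List.range lista.length).foldl (stepB lista) (0, 0, 0)).1,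
       ((List.range lista.length).foldl (stepB lista) (0, 0, 0)).2.1 + 1) := rfl

def acur (lista : List Int) (i : Nat) : Int :=
  if i = 0 then
    findAseqRec (lista.drop 1) (lista.getD i 0 + 1) 1
  else if i = lista.length - 1 then
    findAseqRec (lista.take (lista.length - 1)) (lista.getD i 0 - 1) 0
  else
    findAseqRec (lista.take i) (lista.getD i 0 - 1) 0 +
    findAseqRec (lista.drop (i + 1)) (lista.getD i 0 + 1) 1

def bcur (lista : List Int) (i : Nat) : Int :=
  let cur0 := ascCount (lista.take i) + (suffCounts lista).getD (i + 1) 0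
  let cur1 := if 0 < i ∧ lista.getD (i - 1) 0 < lista.getD i 0 - 1 then cur0 + 1 else cur0
  if i < lista.length - 1 ∧ lista.getD (i + 1) 0 < lista.getD i 0 + 1 then cur1 + 1 else cur1

lemma left_part (lista : List Int) (i : Nat) (c : Int) (h0 : 0 < i) (hi : i ≤ lista.length) :
    findAseqRec (lista.take i) c 0 =
      ascCount (lista.take i) + (if lista.getD (i - 1) 0 < c then 1 else 0) := by
  rw [rec0_eq, asc_snoc, getLast?_take _ _ h0 hi]

lemma right_part (lista : List Int) (i : Nat) (c : Int) (hi : i + 1 ≤ lista.length) :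
    findAseqRec (lista.drop (i + 1)) c 1 =
      (if i + 1 < lista.length ∧ lista.getD (i + 1) 0 < c then 1 else 0) +
        (suffCounts lista).getD (i + 1) 0 := by
  rw [rec1_eq, desc_cons, suff_getD _ _ hi, List.head?_drop]
  rcases Nat.lt_or_ge (i + 1) lista.length with h | h
  · rw [List.getElem?_eq_getElem h]
    simp [h]
  · rw [List.getElem?_eq_none_iff.mpr h]
    simp [Nat.not_lt.mpr h]

lemma acur_eq_bcur (lista : List Int) (i : Nat) (hi : i < lista.length) :
    acur lista i = bcur lista i := by
  unfold acur bcur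
  dsimp only
  by_cases h0 : i = 0
  · subst h0
    rw [if_pos rfl, right_part lista 0 _ (by omega)]
    simp only [List.take_zero, show ascCount [] = 0 from rfl, Nat.zero_sub, zero_add]
    split_ifs <;> omega
  · rw [if_neg h0]
    by_cases h1 : i = lista.length - 1
    · rw [if_pos h1, show lista.length - 1 = i from h1.symm,
        left_part lista i _ (Nat.pos_of_ne_zero h0) (le_of_lt hi)]
      have hdrop : lista.drop (i + 1) = [] := List.drop_eq_nil_of_le (by omega)
      rw [suff_getD _ _ (by omega), hdrop, show descCount [] = 0 from rfl]
      have h1' : i = lista.length - 1 := h1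
      split_ifs <;> omega
    · rw [if_neg h1, left_part lista i _ (Nat.pos_of_ne_zero h0) (le_of_lt hi),
        right_part lista i _ (by omega)]
      split_ifs <;> omega

lemma fold_agree (lista : List Int) : ∀ (k j : Nat), j + k = lista.length → ∀ (cm cnt : Int),
    (List.range' j k).foldl (stepA lista) (cm, cnt) =
      (((List.range' j k).foldl (stepB lista) (cm, cnt, ascCount (lista.take j))).1,
       ((List.range' j k).foldl (stepB lista) (cm, cnt, ascCount (lista.take j))).2.1) := by
  intro k
  induction k with
  | zero => intro j _ cm cnt; simp
  | succ k ih =>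
    intro j hj cm cnt
    rw [List.range'_succ]
    simp only [List.foldl_cons]
    have hjlt : j < lista.length := by omega
    have hA : stepA lista (cm, cnt) j =
        (if bcur lista j > cm then (bcur lista j, 1)
         else if bcur lista j = cm then (cm, cnt + 1) else (cm, cnt)) := by
      rw [show stepA lista (cm, cnt) j =
          (if acur lista j > cm then (acur lista j, 1)
           else if acur lista j = cm then (cm, cnt + 1) else (cm, cnt)) from rfl,
        acur_eq_bcur _ _ hjlt]
    have hpref : (if 0 < j ∧ lista.getD (j - 1) 0 < lista.getD j 0
          then ascCount (lista.take j) + 1 else ascCount (lista.take j)) =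
        ascCount (lista.take (j + 1)) := by
      rw [asc_take_succ _ _ hjlt]; split_ifs <;> omega
    have hB : stepB lista (cm, cnt, ascCount (lista.take j)) j =
        ((if bcur lista j > cm then (bcur lista j, 1)
          else if bcur lista j = cm then (cm, cnt + 1) else (cm, cnt)).1,
         (if bcur lista j > cm then (bcur lista j, 1)
          else if bcur lista j = cm then (cm, cnt + 1) else (cm, cnt)).2,
         if 0 < j ∧ lista.getD (j - 1) 0 < lista.getD j 0
           then ascCount (lista.take j) + 1 else ascCount (lista.take j)) := rfl
    rw [hA, hB, hpref]
    have := ih (j + 1) (by omega)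
      (if bcur lista j > cm then ((bcur lista j : Int), (1 : Int))
       else if bcur lista j = cm then (cm, cnt + 1) else (cm, cnt)).1
      (if bcur lista j > cm then ((bcur lista j : Int), (1 : Int))
       else if bcur lista j = cm then (cm, cnt + 1) else (cm, cnt)).2
    simpa using this

lemma main_eq (lista : List Int) : findAseq1 lista = findAseq1_alt lista := by
  rw [findAseq1_eq_fold, findAseq1_alt_eq_fold]
  have h := fold_agree lista lista.length 0 (by omega) 0 0
  simp only [List.take_zero, show ascCount [] = (0 : Int) from rfl] at h
  rw [List.range_eq_range', h]

-- ===== VERDICT (by name: the statement is the Claim_ definition above) =====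
theorem findAseq1_spec : Claim_equal_findAseq1 := by
  intro lista _
  unfold Spec_findAseq1
  exact main_eq lista
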